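-- pv_equiv track=rewrite | github.com/gglusman/genome-fingerprints | bin/computeDMF.py | enumerateKeys
-- ===== SOURCE A (Python) =====
-- def enumerateKeys(alphabet):
-- 	keys = []
-- 	for ref1 in alphabet:
-- 		for var1 in alphabet:
-- 			if var1==ref1: continue
-- 			for ref2 in alphabet:
-- 				for var2 in alphabet:
-- 					if var2==ref2: continue
-- 					keys.append(ref1+var1+ref2+var2)
-- 	return keys
-- ===== SOURCE B (Python) =====
-- def enumerateKeys(alphabet):
-- 	pairs = [r + v for r in alphabet for v in alphabet if v != r]
-- 	keys = []
-- 	for p1 in pairs: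
-- 		for p2 in pairs:
-- 			keys.append(p1 + p2)
-- 	return keys
-- ===== Notes on version B (the rewrite author's own statement) =====
-- stated objective: alternative
-- what changed: Precomputes the half-key table pairs = [r+v for r,v distinct] once and combines it with itself in a two-level loop, replacing the four nested loops with their two skip-branches.
import Mathlib
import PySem

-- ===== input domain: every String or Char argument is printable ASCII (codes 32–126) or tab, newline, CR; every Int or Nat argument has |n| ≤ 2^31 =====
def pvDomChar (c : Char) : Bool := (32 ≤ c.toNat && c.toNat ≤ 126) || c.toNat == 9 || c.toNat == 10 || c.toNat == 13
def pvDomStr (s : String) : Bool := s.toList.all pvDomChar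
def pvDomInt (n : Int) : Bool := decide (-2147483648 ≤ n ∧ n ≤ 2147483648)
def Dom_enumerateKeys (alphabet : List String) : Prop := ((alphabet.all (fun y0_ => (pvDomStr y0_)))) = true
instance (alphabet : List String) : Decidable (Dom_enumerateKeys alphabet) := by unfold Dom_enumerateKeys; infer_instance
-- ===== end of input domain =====

-- B precomputes the half-key table `pairs` once and combines it with itself in
-- two loops, instead of A's four nested loops with two skip-branches.

-- ===== PORT A =====
def enumerateKeys (alphabet : List String) : List String :=
  alphabet.foldl (fun keys ref1 =>
    alphabet.foldl (fun keys var1 =>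
      if var1 == ref1 then keys else
      alphabet.foldl (fun keys ref2 =>
        alphabet.foldl (fun keys var2 =>
          if var2 == ref2 then keys else
          keys ++ [ref1 ++ var1 ++ ref2 ++ var2]) keys) keys) keys) []

-- ===== PORT B =====
def enumerateKeys_alt (alphabet : List String) : List String :=
  let pairs : List String :=
    alphabet.foldl (fun ps r =>
      alphabet.foldl (fun ps v =>
        if v == r then ps else ps ++ [r ++ v]) ps) []
  pairs.foldl (fun keys p1 =>
    pairs.foldl (fun keys p2 => keys ++ [p1 ++ p2]) keys) []

-- ===== PRECONDITION & SPEC =====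
def Spec_enumerateKeys (alphabet : List String) (out : List String) : Prop := out = enumerateKeys_alt alphabet
instance (alphabet : List String) (out : List String) : Decidable (Spec_enumerateKeys alphabet out) := by unfold Spec_enumerateKeys; infer_instance

-- ===== CLAIM (what is proved, stated in full; the proofs are below) =====
def Claim_equal_enumerateKeys : Prop := ∀ (alphabet : List String), Dom_enumerateKeys alphabet → Spec_enumerateKeys alphabet (enumerateKeys alphabet)

-- ===== LEMMAS AND PROOFS =====

-- 'for x in l: if p(x): continue; out += g(x)'
theorem foldl_skip_append {α β : Type} (l : List α) (p : α → Bool) (g : α → List β)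
    (acc : List β) :
    l.foldl (fun acc x => if p x then acc else acc ++ g x) acc
      = acc ++ (l.filter (fun x => !p x)).flatMap g := by
  induction l generalizing acc with
  | nil => simp
  | cons a t ih =>
      by_cases h : p a <;> simp [List.foldl_cons, h, ih, List.append_assoc]

-- A in flatMap normal form
theorem enumerateKeys_flatMap (alphabet : List String) :
    enumerateKeys alphabet
      = alphabet.flatMap (fun r1 =>
          (alphabet.filter (fun v1 => !(v1 == r1))).flatMap (fun v1 =>
            alphabet.flatMap (fun r2 =>
              (alphabet.filter (fun v2 => !(v2 == r2))).flatMap (fun v2 =>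
                [r1 ++ v1 ++ r2 ++ v2])))) := by
  unfold enumerateKeys
  simp only [foldl_skip_append, PySem.List.foldl_append_eq_flatMap, List.nil_append]

-- B in flatMap normal form
theorem enumerateKeys_alt_flatMap (alphabet : List String) :
    enumerateKeys_alt alphabet
      = (alphabet.flatMap (fun r =>
           (alphabet.filter (fun v => !(v == r))).flatMap (fun v => [r ++ v]))).flatMap
          (fun p1 =>
            (alphabet.flatMap (fun r =>
               (alphabet.filter (fun v => !(v == r))).flatMap (fun v => [r ++ v]))).flatMap
              (fun p2 => [p1 ++ p2])) := by
  unfold enumerateKeys_alt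
  simp only [foldl_skip_append, PySem.List.foldl_append_eq_flatMap, List.nil_append]

-- ===== VERDICT (by name: the statement is the Claim_ definition above) =====
theorem enumerateKeys_spec : Claim_equal_enumerateKeys := by
  intro alphabet _
  show enumerateKeys alphabet = enumerateKeys_alt alphabet
  rw [enumerateKeys_flatMap, enumerateKeys_alt_flatMap]
  simp [List.flatMap_assoc, String.append_assoc]
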